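-- pv_equiv track=rewrite | github.com/smkun/Star-Wars-d6 | Add_New_Aliens.py | parse_special_abilities
-- ===== SOURCE A (Python) =====
-- from typing import Dict, List, Optional
--
-- def parse_special_abilities(block: str) -> List[Dict[str, str]]:
--     if not block:
--         return []
--     abilities: List[Dict[str, str]] = []
--     current_name: Optional[str] = None
--     current_desc: List[str] = []
--     for raw_line in block.splitlines():
--         line = raw_line.strip()
--         if not line:
--             continue
--         if line.lower().startswith("story factors"):
--             break
--         if ':' in line:
--             name_part, rest = line.split(':', 1)
--             if current_name:
--                 abilities.append({
--                     "name": current_name.strip(),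
--                     "description": ' '.join(current_desc).strip(),
--                 })
--             current_name = name_part.strip()
--             current_desc = [rest.strip()]
--         elif current_name:
--             current_desc.append(line)
--     if current_name:
--         abilities.append({
--             "name": current_name.strip(),
--             "description": ' '.join(current_desc).strip(),
--         })
--     return [ability for ability in abilities if ability["name"]]
-- ===== SOURCE B (Python) =====
-- from typing import Dict, List
--
-- def parse_special_abilities(block: str) -> List[Dict[str, str]]:
--     # Phase 1: stripped non-empty lines, truncated at the "story factors" marker.
--     lines: List[str] = []
--     for raw in block.splitlines():
--         s = raw.strip()
--         if not s:
--             continue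
--         if s.lower().startswith("story factors"):
--             break
--         lines.append(s)
--     # Phase 2: group lines, starting a group at each line containing ':'.
--     groups: List[tuple] = []
--     for line in lines:
--         if ':' in line:
--             name, rest = line.split(':', 1)
--             groups.append((name.strip(), [rest.strip()]))
--         elif groups:
--             groups[-1][1].append(line)
--     # Phase 3: build dicts, dropping empty-name groups.
--     return [{"name": n, "description": ' '.join(d).strip()}
--             for n, d in groups if n]
-- ===== Notes on version B (the rewrite author's own statement) =====
-- stated objective: simpler
-- what changed: Replaces A's single-pass deferred-emit state machine (Optional current_name sentinel, emission deferred to the next colon line and a post-loop flush) by a three-phase decomposition: preprocess into stripped non-empty lines truncated at 'story factors', group lines by colon headers, then map each group to its dict and filter empty names.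
import Mathlib
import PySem

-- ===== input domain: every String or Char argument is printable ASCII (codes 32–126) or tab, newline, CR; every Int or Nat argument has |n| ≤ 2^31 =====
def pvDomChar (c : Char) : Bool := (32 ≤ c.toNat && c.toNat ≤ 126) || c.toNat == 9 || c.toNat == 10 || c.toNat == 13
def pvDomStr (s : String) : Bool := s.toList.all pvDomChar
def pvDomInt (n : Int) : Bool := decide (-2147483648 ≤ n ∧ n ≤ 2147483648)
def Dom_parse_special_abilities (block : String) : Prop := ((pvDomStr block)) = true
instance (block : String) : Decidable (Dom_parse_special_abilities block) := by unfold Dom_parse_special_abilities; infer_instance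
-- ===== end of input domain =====

-- B replaces A's deferred-emit sentinel state machine by a three-phase decomposition
-- (preprocess lines, group at colon lines, map groups to dicts); objective: simpler.

-- ===== PORT A =====
-- emission of the pending ability: {"name": current_name.strip(), "description": ' '.join(current_desc).strip()}
def pvA_emit (abilities : List (List (String × String))) (cn : String) (desc : List String) :
    List (List (String × String)) :=
  abilities ++ [[("name", PySem.Str.strip cn), ("description", PySem.Str.strip (PySem.Str.join " " desc))]]

-- A's for-loop (with its break) as structural recursion over the remaining raw lines
def pvA_loop : List String → List (List (String × String)) → Option String → List String →
    List (List (String × String)) × Option String × List String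
  | [], abilities, curName, curDesc => (abilities, curName, curDesc)
  | raw :: rest, abilities, curName, curDesc =>
    let line := PySem.Str.strip raw
    if line = "" then pvA_loop rest abilities curName curDesc
    else if PySem.Str.startswith (PySem.Str.lower line) "story factors" then
      (abilities, curName, curDesc)   -- break
    else if PySem.Str.isIn ":" line then
      match (PySem.Str.splitMax? line ":" 1).getD [] with
      | namePart :: restPart :: _ =>
        let abilities' :=
          match curName with
          | some cn => if cn ≠ "" then pvA_emit abilities cn curDesc else abilities
          | none => abilities
        pvA_loop rest abilities' (some (PySem.Str.strip namePart)) [PySem.Str.strip restPart]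
      | _ => pvA_loop rest abilities curName curDesc   -- unreachable: ':' ∈ line yields two parts
    else
      match curName with
      | some cn =>
        if cn ≠ "" then pvA_loop rest abilities curName (curDesc ++ [line])
        else pvA_loop rest abilities curName curDesc
      | none => pvA_loop rest abilities curName curDesc

def parse_special_abilities (block : String) : List (List (String × String)) :=
  if block = "" then []
  else
    let st := pvA_loop (PySem.Str.splitlines block) [] none []
    let abilities :=
      match st.2.1 with
      | some cn => if cn ≠ "" then pvA_emit st.1 cn st.2.2 else st.1
      | none => st.1
    -- 'if ability["name"]': the key is always present; lookup is first-match, as in the Python dict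
    abilities.filter (fun ab => ((List.lookup "name" ab).getD "") ≠ "")

-- ===== PORT B =====
-- Phase 1: stripped non-empty lines, truncated at the "story factors" marker
def pvB_pre : List String → List String
  | [] => []
  | raw :: rest =>
    let s := PySem.Str.strip raw
    if s = "" then pvB_pre rest
    else if PySem.Str.startswith (PySem.Str.lower s) "story factors" then []
    else s :: pvB_pre rest

-- Phase 2: group lines; 'groups[-1][1].append(line)' mutates the last group in place
def pvB_group : List String → List (String × List String) → List (String × List String)
  | [], groups => groups
  | line :: rest, groups =>
    if PySem.Str.isIn ":" line then
      match (PySem.Str.splitMax? line ":" 1).getD [] with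
      | name :: r :: _ => pvB_group rest (groups ++ [(PySem.Str.strip name, [PySem.Str.strip r])])
      | _ => pvB_group rest groups
    else
      match groups.getLast? with
      | some g => pvB_group rest (groups.dropLast ++ [(g.1, g.2 ++ [line])])
      | none => pvB_group rest groups

-- Phase 3: build the dicts, dropping empty-name groups
def parse_special_abilities_alt (block : String) : List (List (String × String)) :=
  let groups := pvB_group (pvB_pre (PySem.Str.splitlines block)) []
  (groups.filter (fun g => g.1 ≠ "")).map
    (fun g => [("name", g.1), ("description", PySem.Str.strip (PySem.Str.join " " g.2))])

-- ===== PRECONDITION & SPEC =====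
def Spec_parse_special_abilities (block : String) (out : List (List (String × String))) : Prop := out = parse_special_abilities_alt block
instance (block : String) (out : List (List (String × String))) : Decidable (Spec_parse_special_abilities block out) := by unfold Spec_parse_special_abilities; infer_instance

-- ===== CLAIM (what is proved, stated in full; the proofs are below) =====
def Claim_equal_parse_special_abilities : Prop := ∀ (block : String), Dom_parse_special_abilities block → Spec_parse_special_abilities block (parse_special_abilities block)

-- ===== LEMMAS AND PROOFS =====

theorem pv_dropWhile_of_head (p : Char → Bool) (l : List Char)
    (h : ∀ c, l.head? = some c → p c = false) : List.dropWhile p l = l := by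
  cases l with
  | nil => rfl
  | cons a t => simp [h a rfl]

theorem pv_strip_idem (cs : List Char) :
    PySem.Chars.strip (PySem.Chars.strip cs) = PySem.Chars.strip cs := by
  unfold PySem.Chars.strip PySem.Chars.rstrip PySem.Chars.lstrip
  set p := PySem.Chars.isspace
  set y := List.dropWhile p cs with hy
  set r := List.dropWhile p y.reverse with hr
  have hrhead : ∀ c, r.head? = some c → p c = false := by
    intro c hc
    have := List.head?_dropWhile_not p y.reverse
    rw [← hr] at this
    simp [hc] at this
    simpa using this
  have hyhead : ∀ c, y.head? = some c → p c = false := by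
    intro c hc
    have := List.head?_dropWhile_not p cs
    rw [← hy] at this; simp [hc] at this; simpa using this
  have hrlast : ∀ c, r.getLast? = some c → p c = false := by
    intro c hc
    have hsuf : r <:+ y.reverse := List.dropWhile_suffix p
    have : y.reverse.getLast? = some c := by
      rcases hsuf with ⟨t, ht⟩
      rw [← ht, List.getLast?_append]
      simp [hc]
    rw [List.getLast?_reverse] at this
    exact hyhead c this
  have h1 : List.dropWhile p r.reverse = r.reverse := by
    apply pv_dropWhile_of_head
    intro c hc
    rw [List.head?_reverse] at hc
    exact hrlast c hc
  rw [h1, List.reverse_reverse, pv_dropWhile_of_head p r hrhead]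

theorem pv_str_strip_idem (s : String) :
    PySem.Str.strip (PySem.Str.strip s) = PySem.Str.strip s := by
  have h := pv_strip_idem s.toList
  have h2 : (PySem.Str.strip (PySem.Str.strip s)).toList = (PySem.Str.strip s).toList := by
    simpa using h
  exact String.toList_inj.mp h2

def pvEmitB (g : String × List String) : List (String × String) :=
  [("name", g.1), ("description", PySem.Str.strip (PySem.Str.join " " g.2))]

def pvAbs (gs : List (String × List String)) : List (List (String × String)) :=
  (gs.filter (fun g => g.1 ≠ "")).map pvEmitB

def pvFin (st : List (List (String × String)) × Option String × List String) :
    List (List (String × String)) :=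
  match st.2.1 with
  | some cn => if cn ≠ "" then pvA_emit st.1 cn st.2.2 else st.1
  | none => st.1

theorem pvAbs_concat (gs : List (String × List String)) (n : String) (d : List String) :
    pvAbs (gs ++ [(n, d)]) =
      pvAbs gs ++ (if n ≠ "" then [pvEmitB (n, d)] else []) := by
  unfold pvAbs
  rw [List.filter_append, List.map_append]
  by_cases hn : n = "" <;> simp [hn, List.filter, pvEmitB]

theorem pv_finish (gs₀ : List (String × List String)) (n : String) (d d'' : List String)
    (hn : PySem.Str.strip n = n) (hd : n ≠ "" → d'' = d) :
    pvFin (pvAbs gs₀, some n, d) = pvAbs (gs₀ ++ [(n, d'')]) := by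
  rw [pvAbs_concat]
  by_cases hne : n = ""
  · simp [pvFin, hne]
  · simp [pvFin, hne, pvA_emit, pvEmitB, hn, hd hne]

set_option maxHeartbeats 1000000 in
theorem pv_main (raws : List String) :
    ∀ (gs₀ : List (String × List String)) (n : String) (d d'' : List String),
      PySem.Str.strip n = n → (n ≠ "" → d'' = d) →
      pvFin (pvA_loop raws (pvAbs gs₀) (some n) d) =
        pvAbs (pvB_group (pvB_pre raws) (gs₀ ++ [(n, d'')])) := by
  induction raws with
  | nil =>
    intro gs₀ n d d'' hn hd
    simpa [pvA_loop, pvB_pre, pvB_group] using pv_finish gs₀ n d d'' hn hd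
  | cons raw rest ih =>
    intro gs₀ n d d'' hn hd
    by_cases h1 : PySem.Str.strip raw = ""
    · simp only [pvA_loop, pvB_pre, h1, reduceIte]
      exact ih gs₀ n d d'' hn hd
    · by_cases h2 : PySem.Str.startswith (PySem.Str.lower (PySem.Str.strip raw)) "story factors" = true
      · simp only [pvA_loop, pvB_pre, h1, h2, reduceIte]
        simpa [pvB_group] using pv_finish gs₀ n d d'' hn hd
      · rw [Bool.not_eq_true] at h2
        by_cases h3 : PySem.Str.isIn ":" (PySem.Str.strip raw) = true
        · -- colon line
          simp only [pvA_loop, pvB_pre, pvB_group, h1, h2, h3, Bool.false_eq_true,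
            if_false, reduceIte]
          cases hp : (PySem.Str.splitMax? (PySem.Str.strip raw) ":" 1).getD [] with
          | nil => exact ih gs₀ n d d'' hn hd
          | cons np tl =>
            cases tl with
            | nil => exact ih gs₀ n d d'' hn hd
            | cons r tl' =>
              dsimp only
              have habs : (if n ≠ "" then pvA_emit (pvAbs gs₀) n d else pvAbs gs₀) =
                  pvAbs (gs₀ ++ [(n, d'')]) := by
                simpa [pvFin] using pv_finish gs₀ n d d'' hn hd
              rw [habs]
              exact ih (gs₀ ++ [(n, d'')]) (PySem.Str.strip np) [PySem.Str.strip r]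
                [PySem.Str.strip r] (pv_str_strip_idem np) (fun _ => rfl)
        · -- plain line
          rw [Bool.not_eq_true] at h3
          simp only [pvA_loop, pvB_pre, pvB_group, h1, h2, h3, Bool.false_eq_true,
            reduceIte, List.getLast?_concat, List.dropLast_concat]
          by_cases hne : n = ""
          · subst hne
            simp only [ne_eq, not_true_eq_false, reduceIte]
            exact ih gs₀ "" d (d'' ++ [PySem.Str.strip raw]) hn (by simp)
          · simp only [ne_eq, hne, not_false_eq_true, reduceIte]
            exact ih gs₀ n (d ++ [PySem.Str.strip raw]) (d'' ++ [PySem.Str.strip raw]) hn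
              (fun _ => by rw [hd hne])

set_option maxHeartbeats 1000000 in
theorem pv_main0 (raws : List String) :
    pvFin (pvA_loop raws [] none []) = pvAbs (pvB_group (pvB_pre raws) []) := by
  induction raws with
  | nil => rfl
  | cons raw rest ih =>
    by_cases h1 : PySem.Str.strip raw = ""
    · simp only [pvA_loop, pvB_pre, h1, reduceIte]; exact ih
    · by_cases h2 : PySem.Str.startswith (PySem.Str.lower (PySem.Str.strip raw)) "story factors" = true
      · simp only [pvA_loop, pvB_pre, h1, h2, reduceIte]
        rfl
      · rw [Bool.not_eq_true] at h2
        by_cases h3 : PySem.Str.isIn ":" (PySem.Str.strip raw) = true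
        · simp only [pvA_loop, pvB_pre, pvB_group, h1, h2, h3, Bool.false_eq_true,
            if_false, reduceIte]
          cases hp : (PySem.Str.splitMax? (PySem.Str.strip raw) ":" 1).getD [] with
          | nil => exact ih
          | cons np tl =>
            cases tl with
            | nil => exact ih
            | cons r tl' =>
              dsimp only
              have := pv_main rest [] (PySem.Str.strip np) [PySem.Str.strip r] [PySem.Str.strip r]
                (pv_str_strip_idem np) (fun _ => rfl)
              simpa [pvAbs] using this
        · rw [Bool.not_eq_true] at h3
          simp only [pvA_loop, pvB_pre, pvB_group, h1, h2, h3, Bool.false_eq_true,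
            reduceIte]
          exact ih

theorem pv_filter_pvAbs (gs : List (String × List String)) :
    (pvAbs gs).filter (fun ab => ((List.lookup "name" ab).getD "") ≠ "") = pvAbs gs := by
  rw [List.filter_eq_self]
  intro ab hab
  rcases List.mem_map.mp hab with ⟨g, hg, rfl⟩
  have hne : g.1 ≠ "" := by
    have := (List.mem_filter.mp hg).2
    simpa using this
  simp [pvEmitB, hne]

theorem pv_alt_eq (block : String) :
    parse_special_abilities_alt block = pvAbs (pvB_group (pvB_pre (PySem.Str.splitlines block)) []) := rfl

-- ===== VERDICT (by name: the statement is the Claim_ definition above) =====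
theorem parse_special_abilities_spec : Claim_equal_parse_special_abilities := by
  intro block _
  unfold Spec_parse_special_abilities
  by_cases hb : block = ""
  · subst hb; rfl
  · have hA : parse_special_abilities block =
        List.filter (fun ab => decide ((List.lookup "name" ab).getD "" ≠ ""))
          (pvFin (pvA_loop (PySem.Str.splitlines block) [] none [])) := by
      simp only [parse_special_abilities, hb, reduceIte]
      rfl
    rw [hA, pv_main0, pv_filter_pvAbs, pv_alt_eq]
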